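-- pv_equiv track=rewrite | github.com/taxijjang/algorithm | 2024kakao/주사위고르기.py | compare_count2
-- ===== SOURCE A (Python) =====
-- from collections import Counter, defaultdict, OrderedDict
-- from typing import List
--
-- def compare_count2(a_result: List[int], b_result: List[int]):
--     win_draw_lose = defaultdict(int)
--     for a in a_result:
--         for b in b_result:
--             if a > b:
--                 win_draw_lose["win"] += 1
--             else:
--                 break
--     return win_draw_lose
-- ===== SOURCE B (Python) =====
-- from bisect import bisect_left
-- from typing import List
--
-- def compare_count2(a_result: List[int], b_result: List[int]):
--     # prefix maxima of b_result: nondecreasing, so bisect finds the first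
--     # position whose prefix max is >= a, i.e. the length of the prefix a beats
--     pref = []
--     m = None
--     for b in b_result:
--         m = b if (m is None or b > m) else m
--         pref.append(m)
--     total = sum(bisect_left(pref, a) for a in a_result)
--     return {"win": total} if total else {}
-- ===== Notes on version B (the rewrite author's own statement) =====
-- stated objective: faster
-- what changed: Replaces A's nested scan (for each a, walk b_result until the first b >= a) by precomputing the running maxima of b_result once and binary-searching (bisect_left) the first position whose prefix maximum is >= a for each a.
import Mathlib
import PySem

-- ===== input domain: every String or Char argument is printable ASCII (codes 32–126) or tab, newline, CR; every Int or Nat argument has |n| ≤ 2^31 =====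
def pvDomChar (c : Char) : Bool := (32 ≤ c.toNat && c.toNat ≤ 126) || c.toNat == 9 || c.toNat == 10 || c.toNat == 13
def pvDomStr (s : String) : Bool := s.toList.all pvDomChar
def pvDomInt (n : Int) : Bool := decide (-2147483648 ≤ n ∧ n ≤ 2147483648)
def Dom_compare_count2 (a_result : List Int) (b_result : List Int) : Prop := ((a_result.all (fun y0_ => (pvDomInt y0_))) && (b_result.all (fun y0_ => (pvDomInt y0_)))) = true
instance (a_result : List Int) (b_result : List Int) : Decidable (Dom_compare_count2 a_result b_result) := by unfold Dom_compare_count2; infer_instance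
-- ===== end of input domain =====

-- B replaces A's O(n·m) nested scan by prefix maxima of b_result plus a binary search per a (asymptotically faster); return values proved equal.

-- ===== PORT A =====
-- inner 'for b in b_result: if a > b: d["win"] += 1 else: break'
def pvInnerA (a : Int) (d : PySem.Dict String Int) : List Int → PySem.Dict String Int
  | [] => d
  | b :: bs =>
      if a > b then pvInnerA a (d.insert "win" (d.getD "win" 0 + 1)) bs
      else d

def compare_count2 (a_result : List Int) (b_result : List Int) : List (String × Int) :=
  (a_result.foldl (fun d a => pvInnerA a d b_result) PySem.Dict.empty).items

-- ===== PORT B =====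
def compare_count2_alt (a_result : List Int) (b_result : List Int) : List (String × Int) :=
  -- pref: running maxima of b_result (nondecreasing)
  let pref : List Int :=
    (b_result.foldl
      (fun (st : Option Int × List Int) (b : Int) =>
        let m : Int := match st.1 with
          | none => b
          | some m0 => if b > m0 then b else m0
        (some m, st.2 ++ [m]))
      ((none : Option Int), ([] : List Int))).2
  -- bisect_left(pref, a) = length of the prefix of b_result that a beats
  let total : Int := (a_result.map (fun a => ((PySem.List.bisectLeft pref a : Nat) : Int))).sum
  if total ≠ 0 then [("win", total)] else []

-- ===== PRECONDITION & SPEC =====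
def Spec_compare_count2 (a_result : List Int) (b_result : List Int) (out : List (String × Int)) : Prop := out = compare_count2_alt a_result b_result
instance (a_result : List Int) (b_result : List Int) (out : List (String × Int)) : Decidable (Spec_compare_count2 a_result b_result out) := by unfold Spec_compare_count2; infer_instance

-- ===== CLAIM (what is proved, stated in full; the proofs are below) =====
def Claim_equal_compare_count2 : Prop := ∀ (a_result : List Int) (b_result : List Int), Dom_compare_count2 a_result b_result → Spec_compare_count2 a_result b_result (compare_count2 a_result b_result)

-- ===== LEMMAS AND PROOFS =====

-- the number of b's that a beats: the longest prefix of bs with b < a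
def pvCnt (a : Int) (bs : List Int) : Int :=
  ((bs.takeWhile (fun b => decide (a > b))).length : Int)

def pvS (as bs : List Int) : Int := (as.map (fun a => pvCnt a bs)).sum

-- the shape A's dict always has: empty, or the single key "win"
def pvDictOf (c : Int) : PySem.Dict String Int :=
  if c = 0 then PySem.Dict.empty else ⟨[("win", c)]⟩

-- running maxima with current maximum m / of a whole list
def pvPm (m : Int) : List Int → List Int
  | [] => []
  | b :: tl => (if b > m then b else m) :: pvPm (if b > m then b else m) tl

def pvPref : List Int → List Int
  | [] => []
  | b :: tl => b :: pvPm b tl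

lemma pvDict_step (c : Int) (hc : 0 ≤ c) :
    (pvDictOf c).insert "win" ((pvDictOf c).getD "win" 0 + 1) = pvDictOf (c + 1) := by
  by_cases h : c = 0 <;>
    simp [pvDictOf, h, PySem.Dict.insert, PySem.Dict.getD, PySem.Dict.get?,
      PySem.Dict.empty] <;> omega

lemma pvInner_dictOf (a : Int) :
    ∀ (bs : List Int) (c : Int), 0 ≤ c →
      pvInnerA a (pvDictOf c) bs = pvDictOf (c + pvCnt a bs) := by
  intro bs
  induction bs with
  | nil => intro c _; simp [pvInnerA, pvCnt]
  | cons b tl ih =>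
      intro c hc
      by_cases h : a > b
      · have : pvInnerA a (pvDictOf c) (b :: tl)
            = pvInnerA a ((pvDictOf c).insert "win" ((pvDictOf c).getD "win" 0 + 1)) tl := by
          simp [pvInnerA, h]
        rw [this, pvDict_step c hc, ih (c + 1) (by omega)]
        have : pvCnt a (b :: tl) = pvCnt a tl + 1 := by
          simp [pvCnt, h]
          try omega
        rw [this]; ring_nf
      · have hcnt : pvCnt a (b :: tl) = 0 := by
          simp [pvCnt, h]
        simp [pvInnerA, h, hcnt]

lemma pvFold_dictOf (bs : List Int) :
    ∀ (as : List Int) (c : Int), 0 ≤ c →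
      (as.foldl (fun d a => pvInnerA a d bs) (pvDictOf c)) = pvDictOf (c + pvS as bs) := by
  intro as
  induction as with
  | nil => intro c _; simp [pvS]
  | cons a tl ih =>
      intro c hc
      have h0 : (0:Int) ≤ pvCnt a bs := by simp [pvCnt]
      simp only [List.foldl_cons, pvInner_dictOf a bs c hc]
      rw [ih (c + pvCnt a bs) (by omega)]
      have : pvS (a :: tl) bs = pvCnt a bs + pvS tl bs := by simp [pvS]
      rw [this]; ring_nf

lemma pvA_char (a_result b_result : List Int) :
    compare_count2 a_result b_result = (pvDictOf (pvS a_result b_result)).items := by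
  have he : (PySem.Dict.empty : PySem.Dict String Int) = pvDictOf 0 := by
    simp [pvDictOf]
  rw [compare_count2, he, pvFold_dictOf b_result a_result 0 le_rfl, zero_add]

-- B's fold builds exactly pvPref
lemma pvFold_pm (tl : List Int) :
    ∀ (m : Int) (acc : List Int),
      (tl.foldl
        (fun (st : Option Int × List Int) (b : Int) =>
          let m : Int := match st.1 with
            | none => b
            | some m0 => if b > m0 then b else m0
          (some m, st.2 ++ [m]))
        (some m, acc)).2 = acc ++ pvPm m tl := by
  induction tl with
  | nil => intro m acc; simp [pvPm]
  | cons b tl ih =>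
      intro m acc
      rw [List.foldl_cons]
      have h := ih (if b > m then b else m) (acc ++ [if b > m then b else m])
      exact h.trans (by simp [pvPm])

lemma pvFold_pref (bs : List Int) :
    (bs.foldl
      (fun (st : Option Int × List Int) (b : Int) =>
        let m : Int := match st.1 with
          | none => b
          | some m0 => if b > m0 then b else m0
        (some m, st.2 ++ [m]))
      ((none : Option Int), ([] : List Int))).2 = pvPref bs := by
  cases bs with
  | nil => simp [pvPref]
  | cons b tl =>
      rw [List.foldl_cons]
      have h := pvFold_pm tl b [b]
      exact h.trans (by simp [pvPref])

lemma pvPm_mem_le (m : Int) : ∀ (bs : List Int), ∀ x ∈ pvPm m bs, m ≤ x := by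
  intro bs
  induction bs generalizing m with
  | nil => simp [pvPm]
  | cons b tl ih =>
      intro x hx
      simp only [pvPm, List.mem_cons] at hx
      rcases hx with h | h
      · subst h; split <;> omega
      · have := ih (if b > m then b else m) x h
        split at this <;> omega

lemma pvPm_sorted (m : Int) : ∀ (bs : List Int), (pvPm m bs).Pairwise (· ≤ ·) := by
  intro bs
  induction bs generalizing m with
  | nil => simp [pvPm]
  | cons b tl ih =>
      simp only [pvPm, List.pairwise_cons]
      exact ⟨fun x hx => pvPm_mem_le _ tl x hx, ih _⟩

lemma pvPref_sorted (bs : List Int) : (pvPref bs).Pairwise (· ≤ ·) := by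
  cases bs with
  | nil => simp [pvPref]
  | cons b tl =>
      simp only [pvPref, List.pairwise_cons]
      exact ⟨fun x hx => pvPm_mem_le b tl x hx, pvPm_sorted b tl⟩

-- bisect_left on a sorted list is the length of the '< x' prefix
-- three small takeWhile index facts (no matching named lemmas found)
lemma pv_tw_le (p : Int → Bool) (xs : List Int) : (xs.takeWhile p).length ≤ xs.length :=
  (List.takeWhile_prefix p).length_le

lemma pv_tw_elem (p : Int → Bool) :
    ∀ (xs : List Int) (j : Nat) (hj : j < (xs.takeWhile p).length) (hx : j < xs.length),
      p (xs[j]'hx) = true := by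
  intro xs
  induction xs with
  | nil => intro j hj hx; simp at hj
  | cons x tl ih =>
      intro j hj hx
      by_cases hp : p x
      · cases j with
        | zero => simpa using hp
        | succ k =>
            simp only [List.takeWhile_cons, hp, if_true, List.length_cons] at hj
            simpa using ih k (by omega) (by simpa using hx)
      · simp [hp] at hj

lemma pv_tw_stop (p : Int → Bool) :
    ∀ (xs : List Int) (h : (xs.takeWhile p).length < xs.length),
      ¬ p (xs[(xs.takeWhile p).length]'h) = true := by
  intro xs
  induction xs with
  | nil => intro h; simp at h
  | cons x tl ih =>
      intro h
      by_cases hp : p x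
      · have hlt : (tl.takeWhile p).length < tl.length := by
          simpa [List.takeWhile_cons, hp] using h
        have := ih hlt
        simpa [List.takeWhile_cons, hp] using this
      · simpa [List.takeWhile_cons, hp] using hp

-- bisect_left on a sorted list is the length of the '< x' prefix
lemma pvBisect_eq_takeWhile (xs : List Int) (x : Int) (hs : xs.Pairwise (· ≤ ·)) :
    PySem.List.bisectLeft xs x = (xs.takeWhile (fun b => decide (b < x))).length := by
  obtain ⟨hle, hlt, hge⟩ := PySem.List.bisectLeft_spec xs x hs
  set p : Int → Bool := fun b => decide (b < x) with hp
  set t := (xs.takeWhile p).length with ht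
  have htle : t ≤ xs.length := pv_tw_le p xs
  have hmono : ∀ (i j : Nat) (hj : j < xs.length) (hij : i ≤ j), xs[i]'(by omega) ≤ xs[j]'hj := by
    intro i j hj hij
    rcases Nat.lt_or_ge i j with h | h
    · exact List.pairwise_iff_getElem.mp hs i j (by omega) hj h
    · have hij' : i = j := by omega
      subst hij'; exact le_rfl
  have h1 : ∀ (j : Nat) (hj : j < xs.length), j < t → xs[j]'hj < x := by
    intro j hj hjt
    have := pv_tw_elem p xs j hjt hj
    simpa [hp] using this
  have h2 : ∀ (j : Nat) (hj : j < xs.length), t ≤ j → x ≤ xs[j]'hj := by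
    intro j hj hjt
    have htlt : t < xs.length := by omega
    have hnt := pv_tw_stop p xs htlt
    simp only [hp, decide_eq_true_eq] at hnt
    have hxt : x ≤ xs[t]'htlt := Int.not_lt.mp hnt
    exact le_trans hxt (hmono t j hj hjt)
  by_contra hne
  rcases Nat.lt_or_ge (PySem.List.bisectLeft xs x) t with h | h
  · have hb : PySem.List.bisectLeft xs x < xs.length := by omega
    have := hge _ hb le_rfl
    have := h1 _ hb h
    omega
  · have hlt2 : t < PySem.List.bisectLeft xs x := by omega
    have hb : t < xs.length := by omega
    have := hlt t hb hlt2
    have := h2 t hb le_rfl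
    omega

lemma pvPm_takeWhile (a : Int) :
    ∀ (bs : List Int) (m : Int), m < a →
      ((pvPm m bs).takeWhile (fun b => decide (b < a))).length
        = (bs.takeWhile (fun b => decide (a > b))).length := by
  intro bs
  induction bs with
  | nil => intro m _; simp [pvPm]
  | cons b tl ih =>
      intro m hm
      by_cases h : b < a
      · have h2 : a > b := h
        have hm' : (if b > m then b else m) < a := by split <;> omega
        simp only [pvPm, List.takeWhile_cons]
        simp [hm', h2, ih _ hm']
      · have h2 : ¬ a > b := h
        have hm' : ¬ ((if b > m then b else m) < a) := by split <;> omega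
        simp only [pvPm, List.takeWhile_cons]
        simp [hm', h2]

lemma pvPref_takeWhile (a : Int) (bs : List Int) :
    ((pvPref bs).takeWhile (fun b => decide (b < a))).length
      = (bs.takeWhile (fun b => decide (a > b))).length := by
  cases bs with
  | nil => simp [pvPref]
  | cons b tl =>
      by_cases h : b < a
      · have h2 : a > b := h
        simp only [pvPref, List.takeWhile_cons]
        simp [h, pvPm_takeWhile a tl b h]
      · simp only [pvPref, List.takeWhile_cons]
        simp [h]

lemma pvBisect_pref (a : Int) (bs : List Int) :
    ((PySem.List.bisectLeft (pvPref bs) a : Nat) : Int) = pvCnt a bs := by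
  rw [pvBisect_eq_takeWhile (pvPref bs) a (pvPref_sorted bs), pvPref_takeWhile a bs, pvCnt]

lemma pvB_char (a_result b_result : List Int) :
    compare_count2_alt a_result b_result
      = if pvS a_result b_result ≠ 0 then [("win", pvS a_result b_result)] else [] := by
  rw [compare_count2_alt]
  simp only [pvFold_pref b_result]
  have : (a_result.map (fun a => ((PySem.List.bisectLeft (pvPref b_result) a : Nat) : Int))).sum
      = pvS a_result b_result := by
    unfold pvS
    congr 1
    exact List.map_congr_left (fun a _ => pvBisect_pref a b_result)
  rw [this]

-- ===== VERDICT (by name: the statement is the Claim_ definition above) =====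
theorem compare_count2_spec : Claim_equal_compare_count2 := by
  intro a_result b_result _
  unfold Spec_compare_count2
  rw [pvA_char, pvB_char]
  by_cases h : pvS a_result b_result = 0
  · simp [h, pvDictOf, PySem.Dict.empty]
  · simp [h, pvDictOf]
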